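-- pv_equiv track=rewrite | github.com/sandeep-sala/Code | code-wars/py/Switch_on_the_Gravity.py | switch_gravity
-- ===== SOURCE A (Python) =====
-- def switch_gravity(lst):
--     ln = len(lst)
--     sl = len(lst[0])
--     for i in range(0, sl):
--         k = []
--         for j in range(0, ln):
--             k.append(lst[j][i])
--         k.sort(reverse=True)
--         for j in range(0, ln):
--             lst[j][i] = k[j]
--     return lst
-- ===== SOURCE B (Python) =====
-- def switch_gravity(lst):
--     # Online insertion sort per column: stream the rows once, top to bottom,
--     # inserting each value at its position in a descending-ordered list kept
--     # for its column; then write the finished columns back row-major.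
--     # Mutates the row lists in place like the original.
--     ln = len(lst)
--     sl = len(lst[0])
--     cols = [[] for _ in range(sl)]
--     for j in range(ln):
--         for i in range(sl):
--             v = lst[j][i]
--             c = cols[i]
--             p = 0
--             while p < len(c) and c[p] >= v:
--                 p += 1
--             c.insert(p, v)
--     for j in range(ln):
--         for i in range(sl):
--             lst[j][i] = cols[i][j]
--     return lst
-- ===== Notes on version B (the rewrite author's own statement) =====
-- stated objective: alternative
-- what changed: Replaces A's per-column extract/library-sort/write loops by an online insertion sort: one streaming pass over the rows inserts each value at its place in a descending-ordered list maintained per column, then a second pass writes the finished columns back row-major.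
import Mathlib
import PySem

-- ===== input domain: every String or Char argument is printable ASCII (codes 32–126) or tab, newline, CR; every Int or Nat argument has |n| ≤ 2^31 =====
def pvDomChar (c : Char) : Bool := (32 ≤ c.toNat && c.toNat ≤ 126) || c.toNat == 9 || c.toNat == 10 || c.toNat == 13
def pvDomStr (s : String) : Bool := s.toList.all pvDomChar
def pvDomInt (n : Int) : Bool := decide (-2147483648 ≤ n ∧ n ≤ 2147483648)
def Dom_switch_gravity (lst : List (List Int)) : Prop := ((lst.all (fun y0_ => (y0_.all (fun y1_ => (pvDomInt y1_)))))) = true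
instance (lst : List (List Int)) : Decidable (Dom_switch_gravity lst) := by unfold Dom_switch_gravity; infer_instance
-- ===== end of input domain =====

-- B replaces A's per-column extract/library-sort/write loops by an online insertion
-- sort: one streaming pass over the rows inserts each value at its place in a
-- descending-ordered list kept per column, then a second pass writes the finished
-- columns back row-major. Both mutate the argument's rows in place in Python and
-- the equivalence proved here is about the return value.

-- ===== PORT A =====
def switch_gravity (lst : List (List Int)) : List (List Int) :=
  let ln : Int := lst.length
  let sl : Int := (PySem.List.pyGetD lst 0 []).length   -- len(lst[0]); Pre_ excludes lst = []
  (PySem.List.pyRange 0 sl).foldl (fun acc i =>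
    let k : List Int := (PySem.List.pyRange 0 ln).foldl
        (fun k j => k ++ [PySem.List.pyGetD (PySem.List.pyGetD acc j []) i 0]) []
    let k := PySem.List.sorted k (fun x => x) true
    (PySem.List.pyRange 0 ln).foldl
        (fun acc j => PySem.List.pySetD acc j
            (PySem.List.pySetD (PySem.List.pyGetD acc j []) i (PySem.List.pyGetD k j 0))) acc)
    lst

-- ===== PORT B =====
-- Source B's while-scan past the elements ≥ v followed by c.insert(p, v), fused into
-- one structural recursion over the column (exact: peels exactly the scanned prefix)
def pvInsertDesc (v : Int) : List Int → List Int
  | [] => [v]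
  | h :: t => if v ≤ h then h :: pvInsertDesc v t else v :: h :: t

def switch_gravity_alt (lst : List (List Int)) : List (List Int) :=
  let ln : Int := lst.length
  let sl : Int := (PySem.List.pyGetD lst 0 []).length   -- len(lst[0]); Pre_ excludes lst = []
  let cols : List (List Int) := (PySem.List.pyRange 0 sl).map (fun _ => ([] : List Int))
  let cols := (PySem.List.pyRange 0 ln).foldl (fun cols j =>
      (PySem.List.pyRange 0 sl).foldl (fun cols i =>
        PySem.List.pySetD cols i
          (pvInsertDesc (PySem.List.pyGetD (PySem.List.pyGetD lst j []) i 0)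
                        (PySem.List.pyGetD cols i []))) cols) cols
  (PySem.List.pyRange 0 ln).foldl (fun acc j =>
      (PySem.List.pyRange 0 sl).foldl (fun acc i =>
        PySem.List.pySetD acc j
          (PySem.List.pySetD (PySem.List.pyGetD acc j []) i
            (PySem.List.pyGetD (PySem.List.pyGetD cols i []) j 0))) acc) lst

-- ===== PRECONDITION & SPEC =====
-- Pre_ excludes exactly the inputs where A raises IndexError: the empty list
-- (len(lst[0])) and grids with a row shorter than the first row (lst[j][i]).
def Pre_switch_gravity (lst : List (List Int)) : Prop :=
  lst ≠ [] ∧ ∀ row ∈ lst, (lst.headD []).length ≤ row.length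
instance (lst : List (List Int)) : Decidable (Pre_switch_gravity lst) := by
  unfold Pre_switch_gravity; infer_instance
def pvWitness_switch_gravity : List (List Int) := [[1, 3], [2, 0]]

def Spec_switch_gravity (lst : List (List Int)) (out : List (List Int)) : Prop := out = switch_gravity_alt lst
instance (lst : List (List Int)) (out : List (List Int)) : Decidable (Spec_switch_gravity lst out) := by unfold Spec_switch_gravity; infer_instance

-- ===== CLAIM (what is proved, stated in full; the proofs are below) =====
def Claim_equal_switch_gravity : Prop := ∀ (lst : List (List Int)), Dom_switch_gravity lst → Pre_switch_gravity lst → Spec_switch_gravity lst (switch_gravity lst)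


-- ===== LEMMAS AND PROOFS =====

-- column i of lst, sorted descending (what both programs put into column i)
def pvScol (lst : List (List Int)) (i : Nat) : List Int :=
  PySem.List.sorted (lst.map (fun row => row.getD i 0)) (fun x => x) true

-- the grid after the first M columns have been replaced by their sorted versions
def pvW (lst : List (List Int)) (M : Nat) : List (List Int) :=
  lst.mapIdx (fun j row => (List.range M).map (fun i => (pvScol lst i).getD j 0) ++ row.drop M)

lemma pvW_zero (lst : List (List Int)) : pvW lst 0 = lst := by
  simp only [pvW, List.range_zero, List.map_nil, List.nil_append, List.drop_zero]
  apply List.ext_getElem <;> simp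

lemma pvW_length (lst : List (List Int)) (M : Nat) : (pvW lst M).length = lst.length := by
  simp [pvW]

lemma pv_getD_zero_eq_headD (lst : List (List Int)) :
    (PySem.List.pyGetD lst 0 ([] : List Int)).length = (lst.headD []).length := by
  cases lst <;> simp [PySem.List.pyGetD_zero]

-- ---- B side: the streamed insertion builds exactly the descending sort ----

-- column i of lst accumulated by the streaming insertion
def pvInsCol (lst : List (List Int)) (i : Nat) : List Int :=
  lst.foldl (fun c row => pvInsertDesc (row.getD i 0) c) []

lemma pvInsertDesc_perm (v : Int) (c : List Int) : (pvInsertDesc v c).Perm (v :: c) := by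
  induction c with
  | nil => simp [pvInsertDesc]
  | cons h t ih =>
      by_cases hv : v ≤ h
      · simpa [pvInsertDesc, hv] using ((ih.cons h).trans (List.Perm.swap v h t))
      · simp [pvInsertDesc, hv]

lemma pvInsertDesc_pairwise (v : Int) (c : List Int)
    (hc : c.Pairwise (fun a b => b ≤ a)) :
    (pvInsertDesc v c).Pairwise (fun a b => b ≤ a) := by
  induction c with
  | nil => simp [pvInsertDesc]
  | cons h t ih =>
      rcases List.pairwise_cons.mp hc with ⟨hh, ht⟩
      by_cases hv : v ≤ h
      · simp only [pvInsertDesc, if_pos hv]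
        refine List.pairwise_cons.mpr ⟨?_, ih ht⟩
        intro y hy
        rcases List.mem_cons.mp ((pvInsertDesc_perm v t).mem_iff.mp hy) with rfl | hyt
        · exact hv
        · exact hh y hyt
      · simp only [pvInsertDesc, if_neg hv]
        refine List.pairwise_cons.mpr ⟨?_, hc⟩
        intro y hy
        rcases List.mem_cons.mp hy with rfl | hyt
        · exact (not_le.mp hv).le
        · exact le_trans (hh y hyt) (not_le.mp hv).le

lemma pvFold_perm (xs : List Int) : ∀ c : List Int,
    (xs.foldl (fun c v => pvInsertDesc v c) c).Perm (xs ++ c) := by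
  induction xs with
  | nil => intro c; simp
  | cons x xs ih =>
      intro c
      have h1 := ih (pvInsertDesc x c)
      have h2 : (xs ++ pvInsertDesc x c).Perm (xs ++ (x :: c)) :=
        (pvInsertDesc_perm x c).append_left xs
      have h3 : (xs ++ (x :: c)).Perm ((x :: xs) ++ c) := List.perm_middle
      simpa using h1.trans (h2.trans h3)

lemma pvFold_pairwise (xs : List Int) : ∀ c : List Int, c.Pairwise (fun a b => b ≤ a) →
    (xs.foldl (fun c v => pvInsertDesc v c) c).Pairwise (fun a b => b ≤ a) := by
  induction xs with
  | nil => intro c hc; simpa using hc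
  | cons x xs ih =>
      intro c hc
      simpa using ih (pvInsertDesc x c) (pvInsertDesc_pairwise x c hc)

lemma pvInsCol_eq_pvScol (lst : List (List Int)) (i : Nat) :
    pvInsCol lst i = pvScol lst i := by
  haveI : Std.Antisymm (fun a b : Int => b ≤ a) := ⟨fun a b h1 h2 => le_antisymm h2 h1⟩
  have hfold : pvInsCol lst i
      = (lst.map (fun row => row.getD i 0)).foldl (fun c v => pvInsertDesc v c) [] := by
    simp [pvInsCol, List.foldl_map]
  have hp0 := pvFold_perm (lst.map (fun row => row.getD i 0)) []
  rw [List.append_nil] at hp0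
  have hperm : (pvInsCol lst i).Perm (pvScol lst i) := by
    rw [hfold]
    exact hp0.trans (PySem.List.sorted_perm (lst.map (fun row => row.getD i 0)) (fun x => x) true).symm
  have hpw1 : (pvInsCol lst i).Pairwise (fun a b => b ≤ a) :=
    hfold ▸ pvFold_pairwise _ [] (by simp)
  have hpw2 : (pvScol lst i).Pairwise (fun a b => b ≤ a) := by
    simpa using PySem.List.sorted_pairwise_rev (lst.map (fun row => row.getD i 0)) (fun x => x)
  exact List.Perm.eq_of_pairwise' hpw1 hpw2 hperm

-- generic read-modify-write sweep over the indices 0..M-1 of a list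
lemma pvRMW {α : Type} (d : α) (h : Int → α → α) :
    ∀ (M : Nat) (xs : List α), M ≤ xs.length →
    (PySem.List.pyRange 0 (M : Int)).foldl
        (fun r i => PySem.List.pySetD r i (h i (PySem.List.pyGetD r i d))) xs
    = xs.mapIdx (fun n x => if n < M then h (n : Int) x else x) := by
  intro M
  induction M with
  | zero =>
      intro xs _
      rw [show ((0 : Nat) : Int) = (0 : Int) from rfl, PySem.List.pyRange_one_eq_nil le_rfl]
      apply List.ext_getElem
      · simp
      · intro n h1 h2; simp
  | succ M ih =>
      intro xs hM
      have h1 : ((M + 1 : Nat) : Int) = ((M : Nat) : Int) + 1 := by push_cast; ring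
      rw [h1, PySem.List.pyRange_one_succ_right (Int.natCast_nonneg M), List.foldl_append,
          ih xs (by omega), List.foldl_cons, List.foldl_nil]
      set ys := xs.mapIdx (fun n x => if n < M then h (n : Int) x else x) with hys
      have hlen : ys.length = xs.length := by simp [hys]
      have hMlt : M < ys.length := by omega
      rw [PySem.List.pySetD_natCast, PySem.List.pyGetD_natCast]
      apply List.ext_getElem
      · simp [hlen]
      · intro n hn1 hn2
        have hnx : n < xs.length := by simpa [hlen] using hn1
        have h9 : ys[n]? = some (if n < M then h (n : Int) xs[n] else xs[n]) := by
          rw [hys, List.getElem?_mapIdx, List.getElem?_eq_getElem hnx]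
          rfl
        have h10 : ys[n]'(by omega) = if n < M then h (n : Int) xs[n] else xs[n] := by
          have h11 := List.getElem?_eq_getElem (l := ys) (by omega : n < ys.length)
          rw [h9] at h11
          exact (Option.some.inj h11).symm
        by_cases hnM : n = M
        · subst hnM
          have hyd : ys.getD n d = xs[n] := by
            rw [List.getD_eq_getElem (hn := by omega), h10, if_neg (lt_irrefl n)]
            rfl
          rw [List.getElem_set, if_pos rfl, List.getElem_mapIdx,
              if_pos (by omega : n < n + 1), hyd]
          rfl
        · rw [List.getElem_set_ne (fun h => hnM (Eq.symm h)), h10, List.getElem_mapIdx]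
          rcases Nat.lt_or_ge n M with hlt | hge
          · rw [if_pos hlt, if_pos (by omega)]
          · rw [if_neg (by omega), if_neg (by omega)]

-- a fold that only ever writes/reads index a of the accumulator
lemma pvFoldAt {β : Type} (xs : List β) (F : β → List Int → List Int) :
    ∀ (acc : List (List Int)) (a : Nat), a < acc.length →
    xs.foldl (fun acc x => PySem.List.pySetD acc ((a : Nat) : Int)
        (F x (PySem.List.pyGetD acc ((a : Nat) : Int) []))) acc
    = acc.set a (xs.foldl (fun r x => F x r) (acc.getD a [])) := by
  induction xs with
  | nil =>
      intro acc a ha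
      have hgd : acc.getD a [] = acc[a] := by
        rw [List.getD_eq_getElem?_getD, List.getElem?_eq_getElem ha]; rfl
      rw [List.foldl_nil, List.foldl_nil, hgd, List.set_getElem_self]
  | cons x xs ih =>
      intro acc a ha
      rw [List.foldl_cons, PySem.List.pyGetD_natCast, PySem.List.pySetD_natCast]
      have ha' : a < (acc.set a (F x (acc.getD a []))).length := by simpa using ha
      rw [ih _ a ha']
      rw [List.set_set]
      congr 1
      rw [List.foldl_cons]
      congr 1
      rw [List.getD_eq_getElem?_getD, List.getElem?_set_self (by simpa using ha)]
      rfl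

-- writing f n into positions 0..slN-1 of a row is splicing the new prefix in
lemma pvMapIdx_split (row : List Int) (f : Nat → Int) (slN : Nat) (h : slN ≤ row.length) :
    row.mapIdx (fun n x => if n < slN then f n else x)
    = (List.range slN).map f ++ row.drop slN := by
  apply List.ext_getElem
  · simp; omega
  · intro n h1 h2
    have hn : n < row.length := by simpa using h1
    rw [List.getElem_mapIdx]
    rcases Nat.lt_or_ge n slN with hlt | hge
    · rw [if_pos hlt, List.getElem_append_left (by simpa using hlt)]
      simp
    · rw [if_neg (by omega), List.getElem_append_right (by simpa using hge)]
      simp [List.getElem_drop]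
      congr 1
      omega

-- the streaming insertion phase: after t rows, cols holds the insertion-folded columns
lemma pvColsFold (lst : List (List Int)) (slN : Nat) :
    ∀ t : Nat, t ≤ lst.length →
    (PySem.List.pyRange 0 (t : Int)).foldl (fun cols j =>
        (PySem.List.pyRange 0 (slN : Int)).foldl (fun cols i =>
          PySem.List.pySetD cols i
            (pvInsertDesc (PySem.List.pyGetD (PySem.List.pyGetD lst j []) i 0)
                          (PySem.List.pyGetD cols i []))) cols)
      ((PySem.List.pyRange 0 (slN : Int)).map (fun _ => ([] : List Int)))
    = (List.range slN).map (fun i => pvInsCol (lst.take t) i) := by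
  intro t
  induction t with
  | zero =>
      intro _
      rw [show ((0 : Nat) : Int) = (0 : Int) from rfl, PySem.List.pyRange_one_eq_nil le_rfl]
      simp only [List.foldl_nil, List.take_zero]
      rw [PySem.List.pyRange_zero_nat, List.map_map]
      apply List.map_congr_left
      intro n _
      simp [pvInsCol]
  | succ t ih =>
      intro ht
      have h1 : ((t + 1 : Nat) : Int) = ((t : Nat) : Int) + 1 := by push_cast; ring
      rw [h1, PySem.List.pyRange_one_succ_right (Int.natCast_nonneg t), List.foldl_append,
          ih (by omega), List.foldl_cons, List.foldl_nil]
      have hr := pvRMW ([] : List Int)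
          (fun i c => pvInsertDesc
              (PySem.List.pyGetD (PySem.List.pyGetD lst ((t : Nat) : Int) []) i 0) c)
          slN ((List.range slN).map (fun i => pvInsCol (lst.take t) i)) (by simp)
      rw [hr]
      have htl : t < lst.length := by omega
      apply List.ext_getElem
      · simp
      · intro n h1 h2
        have hns : n < slN := by simpa using h1
        rw [List.getElem_mapIdx, if_pos (by simpa using h1), List.getElem_map,
            List.getElem_map, List.getElem_range]
        have hval : PySem.List.pyGetD (PySem.List.pyGetD lst ((t : Nat) : Int) []) ((n : Nat) : Int) 0
            = (lst[t]'htl).getD n 0 := by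
          rw [PySem.List.pyGetD_natCast, PySem.List.pyGetD_natCast,
              List.getD_eq_getElem (hn := htl)]
        beta_reduce
        simp only [pvInsCol]
        rw [hval, List.take_add_one, List.getElem?_eq_getElem htl, Option.toList_some,
            List.foldl_append, List.foldl_cons, List.foldl_nil]

-- the write-back phase
lemma pvBWrite (slN : Nat) (G : Int → Int → Int) :
    ∀ (c a : Nat) (L : List (List Int)), L.length = a + c →
    (∀ j (h : j < L.length), slN ≤ (L[j]'h).length) →
    (PySem.List.pyRange (a : Int) ((L.length : Int))).foldl (fun acc j =>
        (PySem.List.pyRange 0 (slN : Int)).foldl (fun acc i =>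
          PySem.List.pySetD acc j
            (PySem.List.pySetD (PySem.List.pyGetD acc j []) i (G i j))) acc) L
    = L.mapIdx (fun j row =>
        if a ≤ j then (List.range slN).map (fun n : Nat => G (n : Int) (j : Int)) ++ row.drop slN
        else row) := by
  intro c
  induction c with
  | zero =>
      intro a L hL _
      have hnil : PySem.List.pyRange ((a : Nat) : Int) ((L.length : Int)) = [] :=
        PySem.List.pyRange_one_eq_nil (by exact_mod_cast Nat.le_of_eq hL)
      rw [hnil]
      simp only [List.foldl_nil]
      apply List.ext_getElem
      · simp
      · intro i h1 h2
        rw [List.getElem_mapIdx, if_neg (by omega)]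
  | succ c ih =>
      intro a L hL hlong
      have haL : a < L.length := by omega
      have ha : (a : Int) < (L.length : Int) := by exact_mod_cast haL
      have hsl : slN ≤ (L[a]'haL).length := hlong a haL
      rw [PySem.List.pyRange_one_cons ha]
      simp only [List.foldl_cons]
      have hin := pvFoldAt (PySem.List.pyRange 0 (slN : Int))
          (fun i r => PySem.List.pySetD r i (G i ((a : Nat) : Int))) L a haL
      rw [hin]
      have hrow := pvRMW (0 : Int) (fun i _ => G i ((a : Nat) : Int)) slN (L.getD a [])
          (by rw [List.getD_eq_getElem (hn := haL)]; exact hsl)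
      rw [hrow, List.getD_eq_getElem (hn := haL),
          pvMapIdx_split (L[a]'haL) (fun n : Nat => G (n : Int) ((a : Nat) : Int)) slN hsl]
      have hcast : ((a : Int) + 1) = ((a + 1 : Nat) : Int) := by push_cast; ring
      have hlen2 : L.length
          = (L.set a ((List.range slN).map (fun n : Nat => G (n : Int) ((a : Nat) : Int))
              ++ (L[a]'haL).drop slN)).length := by simp
      rw [hcast, show ((L.length : Int))
          = ((L.set a ((List.range slN).map (fun n : Nat => G (n : Int) ((a : Nat) : Int))
              ++ (L[a]'haL).drop slN)).length : Int) by rw [← hlen2]]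
      rw [ih (a + 1)
          (L.set a ((List.range slN).map (fun n : Nat => G (n : Int) ((a : Nat) : Int))
              ++ (L[a]'haL).drop slN))
          (by rw [← hlen2]; omega) ?hrows]
      case hrows =>
        intro j hj
        have hjL : j < L.length := by rw [hlen2]; exact hj
        by_cases hja : j = a
        · subst hja
          have hthis : (L.set j ((List.range slN).map (fun n : Nat => G (n : Int) ((j : Nat) : Int))
                ++ (L[j]'hjL).drop slN))[j]'hj
              = (List.range slN).map (fun n : Nat => G (n : Int) ((j : Nat) : Int))
                ++ (L[j]'hjL).drop slN := by
            simp
          rw [hthis]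
          simp
        · have hthis : (L.set a ((List.range slN).map (fun n : Nat => G (n : Int) ((a : Nat) : Int))
                ++ (L[a]'haL).drop slN))[j]'hj = L[j]'hjL := by
            simp only [List.getElem_set]
            exact if_neg (fun h => hja (Eq.symm h))
          rw [hthis]
          exact hlong j hjL
      set L' := L.set a ((List.range slN).map (fun n : Nat => G (n : Int) ((a : Nat) : Int))
          ++ (L[a]'haL).drop slN) with hL'
      have hlen : L'.length = L.length := by simp [hL']
      apply List.ext_getElem
      · simp [hlen]
      · intro i h1 h2
        have hiL : i < L.length := by simpa [hlen] using h1
        rw [List.getElem_mapIdx, List.getElem_mapIdx]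
        by_cases hia : i = a
        · subst hia
          rw [if_neg (by omega), if_pos (by omega)]
          simp [hL']
        · have hLi : L'[i]'(by omega) = L[i]'hiL := by
            simp only [hL', List.getElem_set]
            exact if_neg (fun h => hia (Eq.symm h))
          rcases Nat.lt_or_ge i a with hlt | hge
          · rw [if_neg (by omega), if_neg (by omega), hLi]
          · rw [if_pos (by omega), if_pos (by omega), hLi]

lemma pv_alt_eq (lst : List (List Int)) (hpre : Pre_switch_gravity lst) :
    switch_gravity_alt lst = pvW lst (lst.headD []).length := by
  obtain ⟨hne, hrows⟩ := hpre
  simp only [switch_gravity_alt, pv_getD_zero_eq_headD]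
  have hcols := pvColsFold lst (lst.headD []).length lst.length le_rfl
  rw [List.take_length] at hcols
  rw [hcols, List.map_congr_left (fun i _ => pvInsCol_eq_pvScol lst i)]
  have hlong : ∀ j (h : j < lst.length), (lst.headD []).length ≤ (lst[j]'h).length :=
    fun j h => hrows _ (List.getElem_mem h)
  have hw := pvBWrite (lst.headD []).length
      (fun i j => PySem.List.pyGetD
        (PySem.List.pyGetD ((List.range (lst.headD []).length).map (fun i => pvScol lst i)) i [])
        j 0)
      lst.length 0 lst (by omega) hlong
  simp only [Nat.cast_zero] at hw
  rw [hw, pvW]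
  apply List.ext_getElem
  · simp
  · intro j hj1 hj2
    have hjl : j < lst.length := by simpa using hj1
    rw [List.getElem_mapIdx, if_pos (Nat.zero_le j), List.getElem_mapIdx]
    congr 1
    apply List.map_congr_left
    intro n hn
    have hns : n < (lst.headD []).length := List.mem_range.mp hn
    have e1 : PySem.List.pyGetD
        ((List.range (lst.headD []).length).map (fun i => pvScol lst i)) ((n : Nat) : Int)
        ([] : List Int) = pvScol lst n := by
      rw [PySem.List.pyGetD_natCast, List.getD_eq_getElem (hn := by simpa using hns),
          List.getElem_map, List.getElem_range]
    rw [e1, PySem.List.pyGetD_natCast]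

lemma pvWriteFold (iN : Nat) (k : List Int) :
    ∀ (c a : Nat) (L : List (List Int)), L.length = a + c →
    (PySem.List.pyRange (a : Int) ((L.length : Int))).foldl
        (fun acc j => PySem.List.pySetD acc j
            (PySem.List.pySetD (PySem.List.pyGetD acc j []) ((iN : Int))
              (PySem.List.pyGetD k j 0))) L
    = L.mapIdx (fun j row => if a ≤ j then row.set iN (k.getD j 0) else row) := by
  intro c
  induction c with
  | zero =>
      intro a L hL
      rw [PySem.List.pyRange_one_eq_nil (by exact_mod_cast Nat.le_of_eq hL)]
      simp only [List.foldl_nil]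
      apply List.ext_getElem
      · simp
      · intro i h1 h2
        rw [List.getElem_mapIdx, if_neg (by omega)]
  | succ c ih =>
      intro a L hL
      have ha : (a : Int) < (L.length : Int) := by exact_mod_cast (by omega : a < L.length)
      rw [PySem.List.pyRange_one_cons ha]
      simp only [List.foldl_cons]
      set L' := L.set a ((L.getD a []).set iN (k.getD a 0)) with hL'
      have hlen : L'.length = L.length := by simp [hL']
      have hstep : PySem.List.pySetD L ((a : Int))
          (PySem.List.pySetD (PySem.List.pyGetD L ((a : Int)) []) ((iN : Int))
            (PySem.List.pyGetD k ((a : Int)) 0)) = L' := by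
        simp [hL', PySem.List.pySetD_natCast, PySem.List.pyGetD_natCast]
      rw [hstep]
      have hcast : ((a : Int) + 1) = ((a + 1 : Nat) : Int) := by push_cast; ring
      rw [hcast, show ((L.length : Int)) = ((L'.length : Int)) by rw [hlen]]
      rw [ih (a + 1) L' (by omega)]
      apply List.ext_getElem
      · simp [hlen]
      · intro i h1 h2
        have hiL : i < L.length := by simpa [hlen] using h1
        rw [List.getElem_mapIdx, List.getElem_mapIdx]
        by_cases hia : i = a
        · subst hia
          rw [if_neg (by omega), if_pos (by omega)]
          simp [hL', List.getD_eq_getElem?_getD, List.getElem?_eq_getElem hiL]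
        · have hLi : L'[i]'(by omega) = L[i]'hiL := by
            simp only [hL', List.getElem_set]
            exact if_neg (fun (h : a = i) => hia (Eq.symm h))
          rcases Nat.lt_or_ge i a with hlt | hge
          · rw [if_neg (by omega), if_neg (by omega), hLi]
          · rw [if_pos (by omega), if_pos (by omega), hLi]

lemma pvMain (lst : List (List Int))
    (hrows : ∀ row ∈ lst, (lst.headD []).length ≤ row.length) :
    ∀ M : Nat, M ≤ (lst.headD []).length →
    (PySem.List.pyRange 0 (M : Int)).foldl (fun acc i =>
      let k : List Int := (PySem.List.pyRange 0 ((lst.length : Int))).foldl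
          (fun k j => k ++ [PySem.List.pyGetD (PySem.List.pyGetD acc j []) i 0]) []
      let k := PySem.List.sorted k (fun x => x) true
      (PySem.List.pyRange 0 ((lst.length : Int))).foldl
          (fun acc j => PySem.List.pySetD acc j
              (PySem.List.pySetD (PySem.List.pyGetD acc j []) i (PySem.List.pyGetD k j 0))) acc)
      lst
    = pvW lst M := by
  intro M
  induction M with
  | zero =>
      intro _
      rw [show ((0 : Nat) : Int) = (0 : Int) from rfl, PySem.List.pyRange_one_eq_nil le_rfl]
      simp [pvW_zero]
  | succ M ih =>
      intro hM
      have h1 : ((M + 1 : Nat) : Int) = ((M : Nat) : Int) + 1 := by push_cast; ring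
      rw [h1, PySem.List.pyRange_one_succ_right (Int.natCast_nonneg M), List.foldl_append,
          ih (by omega), List.foldl_cons, List.foldl_nil]
      simp only [PySem.List.foldl_append_singleton_eq_map, List.nil_append]
      have h0 : (PySem.List.pyRange 0 ((lst.length : Int))).map
          (fun j => PySem.List.pyGetD (pvW lst M) j ([] : List Int)) = pvW lst M := by
        have h := PySem.List.map_pyGetD_pyRange_zero (pvW lst M) ([] : List Int)
        rw [PySem.List.len_eq, pvW_length] at h
        exact h
      have hread : (PySem.List.pyRange 0 ((lst.length : Int))).map
          (fun j => PySem.List.pyGetD (PySem.List.pyGetD (pvW lst M) j []) ((M : Nat) : Int) 0)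
          = lst.map (fun row => row.getD M 0) := by
        calc (PySem.List.pyRange 0 ((lst.length : Int))).map
              (fun j => PySem.List.pyGetD (PySem.List.pyGetD (pvW lst M) j []) ((M : Nat) : Int) 0)
            = ((PySem.List.pyRange 0 ((lst.length : Int))).map
              (fun j => PySem.List.pyGetD (pvW lst M) j [])).map
              (fun row => PySem.List.pyGetD row ((M : Nat) : Int) 0) := by
              simp [List.map_map, Function.comp]
          _ = (pvW lst M).map (fun row => PySem.List.pyGetD row ((M : Nat) : Int) 0) := by rw [h0]
          _ = lst.map (fun row => row.getD M 0) := by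
              simp only [PySem.List.pyGetD_natCast]
              apply List.ext_getElem
              · simp [pvW]
              · intro i hi1 hi2
                simp only [List.getElem_map, pvW, List.getElem_mapIdx]
                rw [List.getD_eq_getElem?_getD, List.getD_eq_getElem?_getD,
                    List.getElem?_append_right (by simp)]
                simp [List.getElem?_drop]
      rw [hread]
      have hw := pvWriteFold M (PySem.List.sorted (lst.map fun row => row.getD M 0)
          (fun x => x) true) lst.length 0 (pvW lst M) (by simp [pvW_length])
      simp only [Nat.cast_zero, pvW_length] at hw
      rw [hw]
      apply List.ext_getElem
      · simp [pvW]
      · intro j hj1 hj2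
        have hjl : j < lst.length := by simpa [pvW] using hj1
        have hMrow : M < lst[j].length :=
          lt_of_lt_of_le (by omega) (hrows _ (List.getElem_mem hjl))
        rw [List.getElem_mapIdx, if_pos (Nat.zero_le j)]
        simp only [pvW, List.getElem_mapIdx]
        rw [List.set_append, if_neg (by simp), List.drop_eq_getElem_cons hMrow]
        simp only [List.length_map, List.length_range, Nat.sub_self, List.set_cons_zero]
        simp [List.range_succ, pvScol]

-- ===== VERDICT (by name: the statement is the Claim_ definition above) =====
theorem switch_gravity_spec : Claim_equal_switch_gravity := by
  intro lst _ hpre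
  obtain ⟨hne, hrows⟩ := hpre
  unfold Spec_switch_gravity
  rw [pv_alt_eq lst ⟨hne, hrows⟩]
  simp only [switch_gravity, pv_getD_zero_eq_headD]
  exact pvMain lst hrows _ le_rfl
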